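-- pv_equiv track=rewrite | github.com/ho0-kim/aic21 | data/get_motion.py | slow_motion
-- ===== SOURCE A (Python) =====
-- def slow_motion(acc_list):
--     #1초(10프레임) 동안 감속일경우
--     count = 0
--     prev = acc_list[0]
--     for acc in acc_list:
--         if acc > prev:
--             count = 0
--             prev = acc
--         elif count == 9:
--             return True
--         else:
--             count += 1
--             prev = acc
--     return False
-- ===== SOURCE B (Python) =====
-- def slow_motion(acc_list):
--     # Pad with the first element so the original's self-comparison of frame 0
--     # becomes an ordinary pairwise comparison inside the first window.
--     p = [acc_list[0]] + acc_list
--     # One second of deceleration = some window of 11 padded samples is non-increasing.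
--     for i in range(len(p) - 10):
--         w = p[i:i + 11]
--         if all(y <= x for x, y in zip(w, w[1:])):
--             return True
--     return False
-- ===== Notes on version B (the rewrite author's own statement) =====
-- stated objective: alternative
-- what changed: Replaces A's streaming run-counter (count/prev state with early return) with a sliding-window algorithm: pad the list with its first element and test every window of 11 consecutive samples for being non-increasing.
import Mathlib
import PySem

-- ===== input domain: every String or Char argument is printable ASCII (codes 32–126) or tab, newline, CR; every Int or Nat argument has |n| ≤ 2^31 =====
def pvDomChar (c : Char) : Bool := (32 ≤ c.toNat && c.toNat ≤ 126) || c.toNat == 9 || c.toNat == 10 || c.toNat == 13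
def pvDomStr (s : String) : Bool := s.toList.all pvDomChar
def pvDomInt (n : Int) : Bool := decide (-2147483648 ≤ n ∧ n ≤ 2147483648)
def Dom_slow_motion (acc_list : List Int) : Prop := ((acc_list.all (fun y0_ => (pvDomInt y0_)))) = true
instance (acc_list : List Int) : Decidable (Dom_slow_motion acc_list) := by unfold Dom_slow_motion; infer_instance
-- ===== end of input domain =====

-- B replaces A's streaming run-counter with a sliding-window check over a padded list
-- (alternative algorithm, same O(n) up to the constant window factor); return value only.

-- ===== PORT A =====
-- A's single fused loop: state (count, prev), early return when count == 9 and still decelerating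
def slowA_loop : List Int → Int → Int → Bool
  | [], _, _ => false
  | acc :: rest, count, prev =>
    if acc > prev then slowA_loop rest 0 acc
    else if count == 9 then true
    else slowA_loop rest (count + 1) acc

def slow_motion (acc_list : List Int) : Bool :=
  match PySem.List.pyGet? acc_list 0 with
  | none => false   -- IndexError on acc_list[0]; excluded by Pre_slow_motion
  | some prev => slowA_loop acc_list 0 prev

-- ===== PORT B =====
-- all(y <= x for x, y in zip(w, w[1:]))
def slowB_window (w : List Int) : Bool :=
  (List.zip w (PySem.List.slice w (some 1) none)).all (fun q => decide (q.2 ≤ q.1))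

def slow_motion_alt (acc_list : List Int) : Bool :=
  match PySem.List.pyGet? acc_list 0 with
  | none => false   -- IndexError on acc_list[0]
  | some a0 =>
    let p := a0 :: acc_list
    (PySem.List.pyRange 0 ((p.length : Int) - 10) 1).any
      (fun i => slowB_window (PySem.List.slice p (some i) (some (i + 11))))

-- ===== PRECONDITION & SPEC =====
-- A indexes the first element, raising IndexError on the empty list; Pre_ excludes exactly that.
def Pre_slow_motion (acc_list : List Int) : Prop := acc_list ≠ []
instance (acc_list : List Int) : Decidable (Pre_slow_motion acc_list) := by unfold Pre_slow_motion; infer_instance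
def pvWitness_slow_motion : List Int := ([3, 2, 1])

def Spec_slow_motion (acc_list : List Int) (out : Bool) : Prop := out = slow_motion_alt acc_list
instance (acc_list : List Int) (out : Bool) : Decidable (Spec_slow_motion acc_list out) := by unfold Spec_slow_motion; infer_instance

-- ===== CLAIM (what is proved, stated in full; the proofs are below) =====
def Claim_equal_slow_motion : Prop := ∀ (acc_list : List Int), Dom_slow_motion acc_list → Pre_slow_motion acc_list → Spec_slow_motion acc_list (slow_motion acc_list)

-- ===== LEMMAS AND PROOFS =====

-- chainB k prev l: the first k elements of l continue a non-increasing chain from prev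
-- (false when l is shorter than k)
def chainB : Nat → Int → List Int → Bool
  | 0, _, _ => true
  | _ + 1, _, [] => false
  | k + 1, prev, x :: t => (decide (x ≤ prev)) && chainB k x t

-- windows starting at every position of the padded list
def tailB : List Int → Bool
  | [] => false
  | x :: t => chainB 10 x t || tailB t

theorem slowB_window_cons₂ (a b : Int) (l : List Int) :
    slowB_window (a :: b :: l) = ((decide (b ≤ a)) && slowB_window (b :: l)) := by
  simp [slowB_window, PySem.List.slice_from_one, List.zip]

theorem chainB_eq_window (t : List Int) :
    ∀ (k : Nat) (x : Int),
      chainB k x t = (if k ≤ t.length then slowB_window (x :: t.take k) else false) := by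
  induction t with
  | nil =>
    intro k x
    cases k with
    | zero => simp [chainB, slowB_window, PySem.List.slice_from_one]
    | succ k => simp [chainB]
  | cons y t ih =>
    intro k x
    cases k with
    | zero => simp [chainB, slowB_window, PySem.List.slice_from_one]
    | succ k =>
      simp only [chainB, List.take_succ_cons, slowB_window_cons₂, ih k y,
        List.length_cons, Nat.add_le_add_iff_right]
      by_cases hk : k ≤ t.length
      · simp [hk]
      · simp [hk]

theorem chainB_mono (t : List Int) :
    ∀ (j k : Nat) (x : Int), j ≤ k → chainB k x t = true → chainB j x t = true := by
  induction t with
  | nil =>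
    intro j k x hjk hk
    cases k with
    | zero => cases Nat.le_zero.mp hjk; exact hk
    | succ k => simp [chainB] at hk
  | cons y t ih =>
    intro j k x hjk hk
    cases j with
    | zero => simp [chainB]
    | succ j =>
      cases k with
      | zero => omega
      | succ k =>
        simp only [chainB, Bool.and_eq_true] at hk ⊢
        exact ⟨hk.1, ih j k y (by omega) hk.2⟩

-- A's loop with run count c already accumulated = "the run continues for 10-c more" or a later window
theorem slowA_loop_eq (rest : List Int) :
    ∀ (prev : Int) (c : Nat), c ≤ 9 →
      slowA_loop rest (c : Int) prev = (chainB (10 - c) prev rest || tailB rest) := by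
  induction rest with
  | nil =>
    intro prev c hc
    obtain ⟨d, hd⟩ : ∃ d, 10 - c = d + 1 := ⟨9 - c, by omega⟩
    simp [slowA_loop, hd, chainB, tailB]
  | cons x t ih =>
    intro prev c hc
    obtain ⟨d, hd⟩ : ∃ d, 10 - c = d + 1 := ⟨9 - c, by omega⟩
    simp only [slowA_loop, tailB, hd, chainB]
    by_cases hx : x > prev
    · have hle : ¬ (x ≤ prev) := by omega
      simp only [hx, if_true, hle, decide_false, Bool.false_and, Bool.false_or]
      have := ih x 0 (by omega)
      norm_num at this
      rw [this]
    · have hle : x ≤ prev := by omega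
      simp only [hx, if_false, hle, decide_true, Bool.true_and]
      by_cases hc9 : c = 9
      · subst hc9
        have : d = 0 := by omega
        subst this
        norm_num [chainB]
      · have hbe : ((c : Int) == 9) = false := by
          simp only [beq_eq_false_iff_ne, ne_eq]
          intro h; exact hc9 (by exact_mod_cast h)
        simp only [hbe, Bool.false_eq_true, if_false]
        have hcast : (c : Int) + 1 = ((c + 1 : Nat) : Int) := by push_cast; ring
        rw [hcast, ih x (c + 1) (by omega)]
        have hd' : 10 - (c + 1) = d := by omega
        rw [hd']
        -- absorption: chainB 10 ⊆ chainB d (d ≤ 10)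
        cases h10 : chainB 10 x t with
        | false => simp
        | true =>
          have := chainB_mono t d 10 x (by omega) h10
          simp [this]

theorem tailB_short (p : List Int) (h : p.length ≤ 10) : tailB p = false := by
  induction p with
  | nil => rfl
  | cons x t ih =>
    simp only [List.length_cons] at h
    rw [tailB, ih (by omega), chainB_eq_window, Bool.or_false]
    have : ¬ (10 ≤ t.length) := by omega
    simp [this]

-- the nat-indexed form of B's window scan equals tailB
theorem anyRange_eq_tailB (p : List Int) :
    (List.range (p.length - 10)).any (fun k => slowB_window ((p.drop k).take 11)) = tailB p := by
  induction p with
  | nil => rfl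
  | cons x t ih =>
    by_cases h : 10 ≤ t.length
    · have hlen : (x :: t).length - 10 = (t.length - 10) + 1 := by
        simp only [List.length_cons]; omega
      rw [hlen, List.range_succ_eq_map]
      simp only [List.any_cons, List.any_map, Function.comp_def, List.drop_succ_cons,
        List.drop_zero]
      rw [ih, tailB]
      congr 1
      rw [chainB_eq_window]
      have h11 : (x :: t).take 11 = x :: t.take 10 := by rfl
      simp [h, h11]
    · have hlen : (x :: t).length - 10 = 0 := by simp only [List.length_cons]; omega
      rw [hlen]
      simp only [List.range_zero, List.any_nil]
      exact (tailB_short (x :: t) (by simp only [List.length_cons]; omega)).symm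

theorem alt_eq_tailB (a : Int) (rest : List Int) :
    slow_motion_alt (a :: rest) = tailB (a :: a :: rest) := by
  have key : ∀ p : List Int,
      ((PySem.List.pyRange 0 ((p.length : Int) - 10) 1).any
        (fun i => slowB_window (PySem.List.slice p (some i) (some (i + 11))))) = tailB p := by
    intro p
    rw [PySem.List.pyRange_one, List.any_map]
    have htn : (((p.length : Int) - 10) - 0).toNat = p.length - 10 := by omega
    rw [htn, ← anyRange_eq_tailB p]
    have hfun : ((fun i => slowB_window (PySem.List.slice p (some i) (some (i + 11)))) ∘
        (fun k : Nat => (0 : Int) + (k : Int)))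
        = (fun k : Nat => slowB_window ((p.drop k).take 11)) := by
      funext k
      simp only [Function.comp_apply, zero_add]
      have h1 : (k : Int) + 11 = ((k + 11 : Nat) : Int) := by push_cast; ring
      rw [h1, PySem.List.slice_natCast, Nat.add_sub_cancel_left]
    rw [hfun]
  simp only [slow_motion_alt, PySem.List.pyGet?, PySem.List.pyIdx?]
  norm_num
  exact key (a :: a :: rest)

-- ===== VERDICT (by name: the statement is the Claim_ definition above) =====
theorem slow_motion_spec : Claim_equal_slow_motion := by
  intro acc_list _ hpre
  match acc_list with
  | [] => exact absurd rfl hpre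
  | a :: rest =>
    show slow_motion (a :: rest) = slow_motion_alt (a :: rest)
    rw [alt_eq_tailB, tailB]
    simp only [slow_motion, PySem.List.pyGet?, PySem.List.pyIdx?]
    norm_num
    have h0 : slowA_loop (a :: rest) ((0 : Nat) : Int) a
        = (chainB (10 - 0) a (a :: rest) || tailB (a :: rest)) :=
      slowA_loop_eq (a :: rest) a 0 (by omega)
    norm_num at h0
    rw [h0]
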